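-- pv_equiv track=rewrite | github.com/yz4004/leetcodeCollection | a_cf/interview/aws_OA_distinct_passwords_by_reversing_substring.py | solve
-- ===== SOURCE A (Python) =====
-- from collections import defaultdict, Counter
--
-- def solve(s):
--     n = len(s)
--     cnt = Counter(s)
--     duplicates = 0
--     for v in cnt.values():
--         t = v * (v - 1) // 2  # 其实就是 comb(v,2)
--         duplicates += t
--     # 说明 上面所有的 a [...] a 两次翻转都会生成原字符串. 所以原串只计1，然后duplicate都减去
--     total = (n + 1) * n // 2
--     return total - duplicates - n + 1  # 再减去n - 每个单字符翻转也会生成原串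
-- ===== SOURCE B (Python) =====
-- def solve(s):
--     seen = {}
--     diff = 0
--     for i, c in enumerate(s):
--         diff += i - seen.get(c, 0)
--         seen[c] = seen.get(c, 0) + 1
--     return diff + 1
-- ===== Notes on version B (the rewrite author's own statement) =====
-- stated objective: alternative
-- what changed: Replaces A's Counter-then-closed-form arithmetic (n(n+1)/2 minus sum of C(v,2) minus n plus 1) by a single streaming pass that, for each position, adds the number of earlier positions holding a different character (running per-character counts in a dict), returning that accumulator plus 1.
import Mathlib
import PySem

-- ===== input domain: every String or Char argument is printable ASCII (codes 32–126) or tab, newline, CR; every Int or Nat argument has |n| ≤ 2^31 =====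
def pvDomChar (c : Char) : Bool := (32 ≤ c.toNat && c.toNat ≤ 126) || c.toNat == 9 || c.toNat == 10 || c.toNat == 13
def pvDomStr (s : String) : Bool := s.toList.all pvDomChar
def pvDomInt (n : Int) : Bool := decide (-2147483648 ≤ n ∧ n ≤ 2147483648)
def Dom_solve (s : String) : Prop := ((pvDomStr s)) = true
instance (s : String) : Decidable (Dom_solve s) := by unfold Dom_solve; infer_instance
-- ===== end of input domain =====

-- B replaces A's Counter-then-closed-form computation by a single streaming pass that
-- accumulates, per position, the number of earlier positions holding a different character
-- (objective: alternative decomposition, same O(n) cost).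

-- ===== PORT A =====
def solve (s : String) : Int :=
  let n : Int := PySem.Str.len s
  let cnt : PySem.Dict Char Int := PySem.Dict.counter s.toList
  let duplicates : Int :=
    cnt.values.foldl (fun duplicates v =>
      let t := PySem.Int.floordiv (v * (v - 1)) 2
      duplicates + t) 0
  let total : Int := PySem.Int.floordiv ((n + 1) * n) 2
  total - duplicates - n + 1

-- ===== PORT B =====
def solve_alt (s : String) : Int :=
  let r :=
    (PySem.List.enumerate s.toList).foldl
      (fun (st : PySem.Dict Char Int × Int) ic =>
        (st.1.insert ic.2 (st.1.getD ic.2 0 + 1), st.2 + ic.1 - st.1.getD ic.2 0))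
      (PySem.Dict.empty, 0)
  r.2 + 1

-- ===== PRECONDITION & SPEC =====
def Spec_solve (s : String) (out : Int) : Prop := out = solve_alt s
instance (s : String) (out : Int) : Decidable (Spec_solve s out) := by unfold Spec_solve; infer_instance

-- ===== CLAIM (what is proved, stated in full; the proofs are below) =====
def Claim_equal_solve : Prop := ∀ (s : String), Dom_solve s → Spec_solve s (solve s)

-- ===== LEMMAS AND PROOFS =====

-- C(m,2) as both programs compute it
def pvC2 (m : Nat) : Int := ((m * (m - 1) / 2 : Nat) : Int)

-- A's "duplicates" sum, expressed over the distinct characters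
def pvDup (q : List Char) : Int :=
  ((PySem.Set.ofList q).map (fun k => pvC2 (List.count k q))).sum

-- the common quantity: number of index pairs i < j with q[i] ≠ q[j]
def pvD (q : List Char) : Int := pvC2 q.length - pvDup q

lemma pvNat_c2 (m : Nat) : (m + 1) * m / 2 = m * (m - 1) / 2 + m := by
  rcases m with _ | n
  · simp
  · obtain ⟨k, hk⟩ := Nat.even_mul_succ_self n
    have hA : (n + 1 + 1) * (n + 1) = n * (n + 1) + 2 * (n + 1) := by ring
    have hB : (n + 1) * ((n + 1) - 1) = n * (n + 1) := by
      simp [Nat.mul_comm]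
    omega

lemma pvC2_succ (m : Nat) : pvC2 (m + 1) = pvC2 m + m := by
  unfold pvC2
  simp only [Nat.add_sub_cancel]
  rw [pvNat_c2]
  push_cast; ring

lemma pvFloordiv_C2 (m : Nat) :
    PySem.Int.floordiv ((m : Int) * ((m : Int) - 1)) 2 = pvC2 m := by
  rcases m with _ | n
  · decide
  · have h : ((n + 1 : Nat) : Int) * (((n + 1 : Nat) : Int) - 1) = (((n + 1) * n : Nat) : Int) := by
      push_cast; ring
    rw [h, show (2 : Int) = ((2 : Nat) : Int) from rfl, PySem.Int.floordiv_natCast]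
    unfold pvC2; simp

lemma pvSum_update {L : List Char} (hn : L.Nodup) {c : Char} (hc : c ∈ L)
    (f g : Char → Int) (hfg : ∀ k, k ≠ c → f k = g k) :
    (L.map f).sum = (L.map g).sum + (f c - g c) := by
  induction L with
  | nil => cases hc
  | cons a L ih =>
    rcases List.nodup_cons.mp hn with ⟨ha, hL⟩
    rcases List.mem_cons.mp hc with h | h
    · subst h
      have : L.map f = L.map g := List.map_congr_left (fun k hk => hfg k (fun e => ha (e ▸ hk)))
      simp [this]; ring
    · have hac : a ≠ c := fun e => ha (e ▸ h)
      simp only [List.map_cons, List.sum_cons, hfg a hac, ih hL h]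
      ring

lemma pvDup_append (q : List Char) (c : Char) :
    pvDup (q ++ [c]) = pvDup q + List.count c q := by
  unfold pvDup
  rw [PySem.Set.ofList_append_singleton]
  have hcount : ∀ k, k ≠ c → List.count k (q ++ [c]) = List.count k q := by
    intro k hk
    simp [List.count_append, Ne.symm hk]
  have hcountc : List.count c (q ++ [c]) = List.count c q + 1 := by
    simp [List.count_append]
  by_cases hc : c ∈ q
  · have hadd : PySem.Set.add (PySem.Set.ofList q) c = PySem.Set.ofList q := by
      simp [PySem.Set.add, PySem.Set.contains, (PySem.Set.mem_ofList q c).mpr hc]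
    rw [hadd,
      pvSum_update (PySem.Set.nodup_ofList q) ((PySem.Set.mem_ofList q c).mpr hc)
        (fun k => pvC2 (List.count k (q ++ [c]))) (fun k => pvC2 (List.count k q))
        (fun k hk => by
          show pvC2 (List.count k (q ++ [c])) = pvC2 (List.count k q)
          rw [hcount k hk])]
    show _ + (pvC2 (List.count c (q ++ [c])) - pvC2 (List.count c q)) = _
    rw [hcountc, pvC2_succ]; ring
  · have hadd : PySem.Set.add (PySem.Set.ofList q) c = PySem.Set.ofList q ++ [c] := by
      simp [PySem.Set.add, PySem.Set.contains, hc, (PySem.Set.mem_ofList q c)]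
    rw [hadd, List.map_append, List.sum_append]
    have hmap : (PySem.Set.ofList q).map (fun k => pvC2 (List.count k (q ++ [c])))
        = (PySem.Set.ofList q).map (fun k => pvC2 (List.count k q)) := by
      refine List.map_congr_left (fun k hk => ?_)
      have hkq : k ∈ q := (PySem.Set.mem_ofList q k).mp hk
      exact congrArg pvC2 (hcount k (fun e => hc (e ▸ hkq)))
    have hc0 : List.count c q = 0 := List.count_eq_zero.mpr hc
    have htail : ([c].map (fun k => pvC2 (List.count k (q ++ [c])))).sum = 0 := by
      simp [hc0, pvC2]
    rw [hmap, htail, hc0]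
    simp

lemma pvD_append (q : List Char) (c : Char) :
    pvD (q ++ [c]) = pvD q + q.length - List.count c q := by
  unfold pvD
  rw [List.length_append, pvDup_append]
  simp only [List.length_cons, List.length_nil, Nat.zero_add]
  rw [pvC2_succ]
  ring

lemma pvCounter_append (p : List Char) (c : Char) :
    PySem.Dict.counter (p ++ [c])
      = (PySem.Dict.counter p).insert c ((List.count c p : Int) + 1) := by
  rw [← PySem.Dict.getD_counter p c,
      ← PySem.Dict.foldl_insert_getD_add_one_eq_counter,
      ← PySem.Dict.foldl_insert_getD_add_one_eq_counter, List.foldl_append]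
  rfl

lemma pvB_fold (l p : List Char) (diff : Int) :
    (PySem.List.enumerate l (p.length : Int)).foldl
      (fun (st : PySem.Dict Char Int × Int) ic =>
        (st.1.insert ic.2 (st.1.getD ic.2 0 + 1), st.2 + ic.1 - st.1.getD ic.2 0))
      (PySem.Dict.counter p, diff)
    = (PySem.Dict.counter (p ++ l), diff + (pvD (p ++ l) - pvD p)) := by
  induction l generalizing p diff with
  | nil => simp [PySem.List.enumerate]
  | cons c l ih =>
    rw [PySem.List.enumerate_cons, List.foldl_cons]
    simp only [PySem.Dict.getD_counter, ← pvCounter_append]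
    have ih' := ih (p ++ [c]) (diff + (p.length : Int) - (List.count c p : Int))
    simp only [List.length_append, List.length_cons, List.length_nil, Nat.zero_add] at ih'
    push_cast at ih'
    rw [ih']
    have hl : p ++ [c] ++ l = p ++ c :: l := by simp
    have hstep := pvD_append p c
    rw [hl]
    refine Prod.ext rfl ?_
    simp only
    omega

-- ===== VERDICT (by name: the statement is the Claim_ definition above) =====
theorem solve_spec : Claim_equal_solve := by
  intro s _
  unfold Spec_solve solve solve_alt
  simp only [PySem.Str.len_eq]
  have hdup : ((PySem.Dict.counter s.toList).values.foldl (fun duplicates v =>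
      duplicates + PySem.Int.floordiv (v * (v - 1)) 2) 0) = pvDup s.toList := by
    have hvals : (PySem.Dict.counter s.toList).values
        = (PySem.Set.ofList s.toList).map (fun k => ((List.count k s.toList : Nat) : Int)) := by
      show (PySem.Dict.counter s.toList).items.map (·.2) = _
      rw [PySem.Dict.items_counter, List.map_map]
      rfl
    rw [hvals, PySem.List.foldl_add, List.map_map]
    unfold pvDup
    rw [show ((fun v => PySem.Int.floordiv (v * (v - 1)) 2) ∘
          fun k => ((List.count k s.toList : Nat) : Int))
        = fun k => pvC2 (List.count k s.toList) from funext fun k => pvFloordiv_C2 _]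
    ring
  have htot : PySem.Int.floordiv (((s.toList.length : Int) + 1) * (s.toList.length : Int)) 2
      = pvC2 s.toList.length + (s.toList.length : Int) := by
    have h : ((s.toList.length : Int) + 1) * (s.toList.length : Int)
        = ((s.toList.length + 1 : Nat) : Int) * (((s.toList.length + 1 : Nat) : Int) - 1) := by
      push_cast; ring
    rw [h, pvFloordiv_C2, pvC2_succ]
  have hB := pvB_fold s.toList [] 0
  simp only [List.nil_append, List.length_nil, Int.natCast_zero] at hB
  show _ = ((PySem.List.enumerate s.toList 0).foldl _ (PySem.Dict.empty, (0:Int))).2 + 1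
  have hempty : (PySem.Dict.empty : PySem.Dict Char Int) = PySem.Dict.counter [] := rfl
  rw [hempty, hB]
  have hD0 : pvD [] = 0 := by decide
  rw [hD0]
  unfold pvD
  rw [hdup, htot]
  ring
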